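-- pv_equiv track=rewrite | github.com/NirajDudani/usd-validator | validators/duplicate_names.py | _check_case_siblings
-- ===== SOURCE A (Python) =====
-- from collections import defaultdict
--
-- CHECK_NAME = "Duplicate Names"
--
-- def _check_case_siblings(parent_children):
--     results = []
--     for parent_path in sorted(parent_children):
--         lower_to_variants = defaultdict(list)
--         for name in parent_children[parent_path]:
--             lower_to_variants[name.lower()].append(name)
--
--         for variants in sorted(lower_to_variants.values(), key=lambda v: sorted(v)[0].lower()):
--             # More than one distinct name with the same lowercase form = case-only collision.
--             if len(variants) > 1:
--                 names_str = _format_name_list(sorted(variants))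
--                 results.append((CHECK_NAME, "error",
--                     f"'{parent_path}': prim names {names_str} differ only by case"))
--     return results
--
-- def _format_name_list(names):
--     """Format ['a'] → \"'a'\", ['a','b'] → \"'a' and 'b'\", ['a','b','c'] → \"'a', 'b' and 'c'\"."""
--     quoted = [f"'{n}'" for n in names]
--     if len(quoted) == 1:
--         return quoted[0]
--     if len(quoted) == 2:
--         return f"{quoted[0]} and {quoted[1]}"
--     return ", ".join(quoted[:-1]) + f" and {quoted[-1]}"
-- ===== SOURCE B (Python) =====
-- from itertools import groupby
--
-- CHECK_NAME = "Duplicate Names"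
--
-- def _check_case_siblings(parent_children):
--     results = []
--     for parent_path in sorted(parent_children):
--         names = sorted(parent_children[parent_path], key=str.lower)
--         for _low, grp in groupby(names, key=str.lower):
--             grp = list(grp)
--             if len(grp) > 1:
--                 names_str = _format_name_list(sorted(grp))
--                 results.append((CHECK_NAME, "error",
--                     f"'{parent_path}': prim names {names_str} differ only by case"))
--     return results
--
-- def _format_name_list(names):
--     quoted = [f"'{n}'" for n in names]
--     if len(quoted) == 1:
--         return quoted[0]
--     if len(quoted) == 2:
--         return f"{quoted[0]} and {quoted[1]}"
--     return ", ".join(quoted[:-1]) + f" and {quoted[-1]}"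
-- ===== Notes on version B (the rewrite author's own statement) =====
-- stated objective: alternative
-- what changed: Replaces the defaultdict hash-grouping plus a key-sort of the collected groups with a single stable sort of each parent's child names by their lowercase form followed by an adjacent itertools.groupby scan; stability makes the groups and their order identical.
import Mathlib
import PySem

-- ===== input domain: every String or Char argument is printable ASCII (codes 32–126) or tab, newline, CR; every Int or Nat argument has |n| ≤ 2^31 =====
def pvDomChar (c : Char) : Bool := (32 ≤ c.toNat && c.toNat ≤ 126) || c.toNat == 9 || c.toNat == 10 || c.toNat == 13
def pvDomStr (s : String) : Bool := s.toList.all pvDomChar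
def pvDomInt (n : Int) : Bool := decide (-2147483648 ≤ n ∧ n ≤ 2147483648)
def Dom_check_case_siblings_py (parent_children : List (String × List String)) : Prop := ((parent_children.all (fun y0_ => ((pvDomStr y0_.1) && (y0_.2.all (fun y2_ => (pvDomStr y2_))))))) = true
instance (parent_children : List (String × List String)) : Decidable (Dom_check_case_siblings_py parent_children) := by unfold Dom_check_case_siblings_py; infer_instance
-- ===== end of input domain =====

-- B replaces A's defaultdict hash-grouping plus key-sort of the groups by a single
-- sort of the names by lowercase form followed by an adjacent groupby scan (same results, same order).

-- ===== PORT A =====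

-- CHECK_NAME
def pvCheckName : String := "Duplicate Names"

-- _format_name_list; both Pythons call it only with a nonempty list, so the
-- total forms headD/getD/getLastD are exact here (Python would raise IndexError on []).
def pvFormatNameList (names : List String) : String :=
  let quoted := names.map (fun n => "'" ++ n ++ "'")
  if quoted.length == 1 then quoted.headD ""
  else if quoted.length == 2 then quoted.headD "" ++ " and " ++ quoted.getD 1 ""
  else PySem.Str.join ", " quoted.dropLast ++ " and " ++ quoted.getLastD ""

-- literal port of _check_case_siblings (A); the incoming dict is the assoc list
-- through PySem.Dict.ofList (Python dict construction: last value wins, first position kept).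
-- sorted(v)[0] is headD of the sorted list: v (a dict value) is always nonempty, so exact.
def check_case_siblings_py (parent_children : List (String × List String)) : List (String × String × String) :=
  let d := PySem.Dict.ofList parent_children
  (PySem.List.sorted d.keys (fun k => k)).foldl (fun results parent_path =>
    let names := d.getD parent_path []
    let lower_to_variants := names.foldl
      (fun m n => m.modify (PySem.Str.lower n) [] (fun v => v ++ [n])) PySem.Dict.empty
    (PySem.List.sorted lower_to_variants.values
        (fun v => PySem.Str.lower ((PySem.List.sorted v (fun x => x)).headD ""))).foldl
      (fun results variants =>
        if variants.length > 1 then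
          results ++ [(pvCheckName, "error",
            "'" ++ parent_path ++ "': prim names "
              ++ pvFormatNameList (PySem.List.sorted variants (fun x => x))
              ++ " differ only by case")]
        else results) results) []

-- ===== PORT B =====

-- itertools.groupby(ns, key): maximal runs of adjacent elements sharing the key
def pvGroupby (key : String → String) : List String → List (List String)
  | [] => []
  | x :: xs =>
    (x :: xs.takeWhile (fun y => key y == key x))
      :: pvGroupby key (xs.dropWhile (fun y => key y == key x))
termination_by ns => ns.length
decreasing_by
  exact Nat.lt_succ_of_le (List.length_dropWhile_le _ _)

-- literal port of B's _check_case_siblings (sort by lowercase, then adjacent groupby)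
def check_case_siblings_py_alt (parent_children : List (String × List String)) : List (String × String × String) :=
  let d := PySem.Dict.ofList parent_children
  (PySem.List.sorted d.keys (fun k => k)).foldl (fun results parent_path =>
    let names := PySem.List.sorted (d.getD parent_path []) (fun n => PySem.Str.lower n)
    (pvGroupby (fun n => PySem.Str.lower n) names).foldl
      (fun results grp =>
        if grp.length > 1 then
          results ++ [(pvCheckName, "error",
            "'" ++ parent_path ++ "': prim names "
              ++ pvFormatNameList (PySem.List.sorted grp (fun x => x))
              ++ " differ only by case")]
        else results) results) []

-- ===== PRECONDITION & SPEC =====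
def Spec_check_case_siblings_py (parent_children : List (String × List String)) (out : List (String × String × String)) : Prop := out = check_case_siblings_py_alt parent_children
instance (parent_children : List (String × List String)) (out : List (String × String × String)) : Decidable (Spec_check_case_siblings_py parent_children out) := by unfold Spec_check_case_siblings_py; infer_instance

-- ===== CLAIM (what is proved, stated in full; the proofs are below) =====
def Claim_equal_check_case_siblings_py : Prop := ∀ (parent_children : List (String × List String)), Dom_check_case_siblings_py parent_children → Spec_check_case_siblings_py parent_children (check_case_siblings_py parent_children)

-- ===== LEMMAS AND PROOFS =====

lemma pv_takeWhile_eq_filter (key : String → String) (x : String) :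
    ∀ xs : List String, (∀ y ∈ xs, key x ≤ key y) →
      xs.Pairwise (fun a b => key a ≤ key b) →
      xs.takeWhile (fun y => key y == key x) = xs.filter (fun y => key y == key x)
  | [], _, _ => rfl
  | y :: t, hx, hp => by
    by_cases hy : key y = key x
    · simp only [List.takeWhile_cons, List.filter_cons, show (key y == key x) = true by simp [hy],
        if_pos]
      rw [pv_takeWhile_eq_filter key x t (fun z hz => hx z (List.mem_cons_of_mem y hz)) hp.of_cons]
    · have hlt : key x < key y :=
        lt_of_le_of_ne (hx y (List.mem_cons_self)) (Ne.symm hy)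
      have hnil : t.filter (fun z => key z == key x) = [] := by
        rw [List.filter_eq_nil_iff]
        intro z hz
        have : key y ≤ key z := (List.pairwise_cons.mp hp).1 z hz
        simp only [beq_iff_eq]
        exact fun h => absurd (h ▸ lt_of_lt_of_le hlt this) (lt_irrefl _)
      simp only [List.takeWhile_cons, List.filter_cons, show (key y == key x) = false by simp [hy],
        if_neg Bool.false_ne_true, hnil]

lemma pv_dropWhile_gt (key : String → String) (x : String) :
    ∀ xs : List String, (∀ y ∈ xs, key x ≤ key y) →
      xs.Pairwise (fun a b => key a ≤ key b) →
      ∀ y ∈ xs.dropWhile (fun y => key y == key x), key x < key y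
  | [], _, _ => by simp
  | y :: t, hx, hp => by
    by_cases hy : key y = key x
    · simp only [List.dropWhile_cons, show (key y == key x) = true by simp [hy], if_pos]
      exact pv_dropWhile_gt key x t (fun z hz => hx z (List.mem_cons_of_mem y hz)) hp.of_cons
    · have hlt : key x < key y := lt_of_le_of_ne (hx y (List.mem_cons_self)) (Ne.symm hy)
      simp only [List.dropWhile_cons, show (key y == key x) = false by simp [hy],
        if_neg Bool.false_ne_true]
      intro z hz
      rcases List.mem_cons.mp hz with h | h
      · exact h ▸ hlt
      · exact lt_of_lt_of_le hlt ((List.pairwise_cons.mp hp).1 z h)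

lemma pv_add_of_mem {α : Type} [BEq α] [LawfulBEq α] {s : PySem.Set α} {x : α} (hx : x ∈ s) :
    PySem.Set.add s x = s := by
  simp [PySem.Set.add]; exact hx

lemma pv_foldl_add_filter {α : Type} [BEq α] [LawfulBEq α] (a : α) :
    ∀ (l : List α) (s : PySem.Set α), a ∈ s →
      List.foldl PySem.Set.add s l = List.foldl PySem.Set.add s (l.filter (fun x => x != a))
  | [], s, _ => rfl
  | x :: l, s, ha => by
    by_cases hx : x = a
    · simp only [List.filter_cons, show (x != a) = false by simp [hx], List.foldl_cons,
        if_neg Bool.false_ne_true]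
      rw [show PySem.Set.add s x = s from pv_add_of_mem (hx ▸ ha)]
      exact pv_foldl_add_filter a l s ha
    · have hmem : a ∈ PySem.Set.add s x := (PySem.Set.mem_add s x a).mpr (Or.inl ha)
      simp only [List.filter_cons, List.foldl_cons, show (x != a) = true by simp [hx], if_pos]
      exact pv_foldl_add_filter a l (PySem.Set.add s x) hmem

lemma pv_foldl_add_cons {α : Type} [BEq α] [LawfulBEq α] (a : α) :
    ∀ (l : List α) (s : PySem.Set α), a ∉ l →
      List.foldl PySem.Set.add (a :: s) l = a :: List.foldl PySem.Set.add s l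
  | [], s, _ => rfl
  | x :: l, s, ha => by
    have hxa : x ≠ a := fun h => ha (by simp [h])
    have hl : a ∉ l := fun h => ha (by simp [h])
    have hca : PySem.Set.contains (a :: s) x = PySem.Set.contains s x := by
      simp only [PySem.Set.contains, List.contains_cons]
      simp
      exact fun h => absurd h hxa
    simp only [List.foldl_cons]
    by_cases hc : PySem.Set.contains s x = true
    · have h1 : PySem.Set.add (a :: s) x = a :: s := by
        simp only [PySem.Set.add, hca, hc, if_pos]
      have h2 : PySem.Set.add s x = s := by simp only [PySem.Set.add, hc, if_pos]
      rw [h1, h2, pv_foldl_add_cons a l s hl]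
    · have h1 : PySem.Set.add (a :: s) x = a :: (s ++ [x]) := by
        simp only [PySem.Set.add, hca, hc, if_neg Bool.false_ne_true]
        · rfl
      have h2 : PySem.Set.add s x = s ++ [x] := by
        simp only [PySem.Set.add, hc, if_neg Bool.false_ne_true]
      rw [h1, h2, pv_foldl_add_cons a l (s ++ [x]) hl]

lemma pv_dedup_cons {α : Type} [BEq α] [LawfulBEq α] (a : α) (l : List α) :
    PySem.List.dedup (a :: l) = a :: PySem.List.dedup (l.filter (fun x => x != a)) := by
  have h0 : PySem.Set.add (PySem.Set.empty : PySem.Set α) a = [a] := rfl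
  have hnm : a ∉ l.filter (fun x => x != a) := by simp
  rw [PySem.List.dedup_eq_ofList, PySem.List.dedup_eq_ofList, PySem.Set.ofList, PySem.Set.ofList,
    List.foldl_cons, h0]
  rw [pv_foldl_add_filter a l [a] (by simp), show ([a] : List α) = a :: ([] : List α) from rfl,
    pv_foldl_add_cons a _ _ hnm]
  rfl

lemma pv_groupby_eq (key : String → String) (ns : List String)
    (h : ns.Pairwise (fun a b => key a ≤ key b)) :
    pvGroupby key ns
      = (PySem.List.dedup (ns.map key)).map (fun k => ns.filter (fun n => key n == k)) := by
  revert h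
  induction ns using pvGroupby.induct key with
  | case1 => intro _; simp [pvGroupby]
  | case2 x xs IH =>
    intro h
    have hx : ∀ y ∈ xs, key x ≤ key y := (List.pairwise_cons.mp h).1
    have hxs : xs.Pairwise (fun a b => key a ≤ key b) := h.of_cons
    have hrest : (xs.dropWhile (fun y => key y == key x)).Pairwise (fun a b => key a ≤ key b) :=
      List.Pairwise.sublist (List.dropWhile_sublist _) hxs
    have hgt : ∀ y ∈ xs.dropWhile (fun y => key y == key x), key x < key y :=
      pv_dropWhile_gt key x xs hx hxs
    have hsplit : xs.takeWhile (fun y => key y == key x)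
        ++ xs.dropWhile (fun y => key y == key x) = xs := List.takeWhile_append_dropWhile
    -- step 3: the filtered key list is the keys of the remainder
    have step3 : (xs.map key).filter (fun c => c != key x)
        = (xs.dropWhile (fun y => key y == key x)).map key := by
      conv_lhs => rw [← hsplit]
      rw [List.map_append, List.filter_append]
      have h1 : ((xs.takeWhile (fun y => key y == key x)).map key).filter
          (fun c => c != key x) = [] := by
        rw [List.filter_eq_nil_iff]
        intro c hc
        rcases List.mem_map.mp hc with ⟨y, hy, rfl⟩
        have := List.mem_takeWhile_imp hy
        simp only [beq_iff_eq] at this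
        simp [this]
      have h2 : ((xs.dropWhile (fun y => key y == key x)).map key).filter
          (fun c => c != key x) = (xs.dropWhile (fun y => key y == key x)).map key := by
        rw [List.filter_eq_self]
        intro c hc
        rcases List.mem_map.mp hc with ⟨y, hy, rfl⟩
        simp [ne_of_gt (hgt y hy)]
      rw [h1, h2, List.nil_append]
    have step5 : (x :: xs).filter (fun n => key n == key x)
        = x :: xs.takeWhile (fun y => key y == key x) := by
      rw [List.filter_cons, if_pos (by simp), pv_takeWhile_eq_filter key x xs hx hxs]
    have step6 : ∀ k ∈ PySem.List.dedup ((xs.dropWhile (fun y => key y == key x)).map key),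
        (x :: xs).filter (fun n => key n == k)
          = (xs.dropWhile (fun y => key y == key x)).filter (fun n => key n == k) := by
      intro k hk
      rw [PySem.List.mem_dedup] at hk
      rcases List.mem_map.mp hk with ⟨y0, hy0, rfl⟩
      have hklt : key x < key y0 := hgt y0 hy0
      rw [List.filter_cons, if_neg (by simp [ne_of_lt hklt])]
      conv_lhs => rw [← hsplit]
      rw [List.filter_append]
      have h1 : (xs.takeWhile (fun y => key y == key x)).filter
          (fun n => key n == key y0) = [] := by
        rw [List.filter_eq_nil_iff]
        intro z hz
        have := List.mem_takeWhile_imp hz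
        simp only [beq_iff_eq] at this ⊢
        exact this ▸ (ne_of_lt hklt)
      rw [h1, List.nil_append]
    rw [pvGroupby]
    rw [show (x :: xs).map key = key x :: xs.map key from rfl, pv_dedup_cons, step3,
      List.map_cons, step5, IH hrest, List.map_congr_left step6]

lemma pv_dedup_pairwise_lt_aux {κ : Type} [BEq κ] [LawfulBEq κ] [LinearOrder κ] :
    ∀ (n : Nat) (l : List κ), l.length ≤ n → l.Pairwise (fun a b => a ≤ b) →
      (PySem.List.dedup l).Pairwise (fun a b => a < b)
  | _, [], _, _ => List.Pairwise.nil
  | 0, a :: l, h, _ => by simp at h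
  | n + 1, a :: l, h, hp => by
    rw [pv_dedup_cons]
    refine List.pairwise_cons.mpr ⟨?_, ?_⟩
    · intro b hb
      rw [PySem.List.mem_dedup] at hb
      simp only [List.mem_filter, bne_iff_ne] at hb
      exact lt_of_le_of_ne ((List.pairwise_cons.mp hp).1 b hb.1) (Ne.symm hb.2)
    · exact pv_dedup_pairwise_lt_aux n _
        (le_trans (List.length_filter_le _ _) (Nat.le_of_succ_le_succ h))
        (List.Pairwise.sublist List.filter_sublist hp.of_cons)

lemma pv_dedup_pairwise_lt {κ : Type} [BEq κ] [LawfulBEq κ] [LinearOrder κ] (l : List κ)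
    (h : l.Pairwise (fun a b => a ≤ b)) :
    (PySem.List.dedup l).Pairwise (fun a b => a < b) :=
  pv_dedup_pairwise_lt_aux l.length l le_rfl h

def pvGroupOf (names : List String) (k : String) : List String :=
  names.filter (fun n => PySem.Str.lower n == k)

lemma pv_dedup_sorted_eq (names : List String) :
    PySem.List.dedup ((PySem.List.sorted names (fun n => PySem.Str.lower n)).map PySem.Str.lower)
      = PySem.List.sorted (PySem.List.dedup (names.map PySem.Str.lower)) (fun x => x) := by
  symm
  apply PySem.List.sorted_eq_of_perm_of_pairwise_lt
  · rw [List.perm_ext_iff_of_nodup (PySem.List.nodup_dedup _) (PySem.List.nodup_dedup _)]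
    intro a
    rw [PySem.List.mem_dedup, PySem.List.mem_dedup]
    exact ((PySem.List.sorted_perm names (fun n => PySem.Str.lower n) false).map
      PySem.Str.lower).mem_iff
  · exact pv_dedup_pairwise_lt _ (PySem.List.sorted_map_key_pairwise names _)

lemma pv_filter_insertBy (key : String → String) (x : String) (k : String) :
    ∀ ys : List String, ys.Pairwise (fun a b => key a ≤ key b) →
      (PySem.List.insertBy (fun a b => decide (key a < key b)) x ys).filter
          (fun y => key y == k)
        = ys.filter (fun y => key y == k) ++ (if key x == k then [x] else [])
  | [], _ => by
    simp [PySem.List.insertBy, List.filter_cons]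
  | y :: t, h => by
    simp only [PySem.List.insertBy]
    split
    · rename_i hlt
      simp only [decide_eq_true_eq] at hlt
      by_cases hk : key x = k
      · have hnil : (y :: t).filter (fun z => key z == k) = [] := by
          rw [List.filter_eq_nil_iff]
          intro z hz
          have hyz : key y ≤ key z := by
            rcases List.mem_cons.mp hz with rfl | hz'
            · exact le_rfl
            · exact (List.pairwise_cons.mp h).1 z hz'
          simp only [beq_iff_eq]
          exact fun hzk => absurd (hzk ▸ (hk ▸ lt_of_lt_of_le hlt hyz)) (lt_irrefl _)
        rw [List.filter_cons, if_pos (by simp [hk]), hnil, if_pos (by simp [hk]), List.nil_append]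
      · rw [List.filter_cons, if_neg (by simp [hk]), if_neg (by simp [hk]), List.append_nil]
    · rw [List.filter_cons, List.filter_cons,
        pv_filter_insertBy key x k t h.of_cons]
      split <;> simp

lemma pv_filter_sorted (names : List String) (k : String) :
    (PySem.List.sorted names (fun n => PySem.Str.lower n)).filter
        (fun n => PySem.Str.lower n == k)
      = pvGroupOf names k := by
  induction names using List.reverseRecOn with
  | nil => rfl
  | append_singleton names x IH =>
    have hstep : PySem.List.sorted (names ++ [x]) (fun n => PySem.Str.lower n)
        = PySem.List.insertBy (fun a b => decide (PySem.Str.lower a < PySem.Str.lower b)) x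
            (PySem.List.sorted names (fun n => PySem.Str.lower n)) := by
      rw [PySem.List.sorted_eq_foldl_insertBy, PySem.List.sorted_eq_foldl_insertBy,
        List.foldl_append, List.foldl_cons, List.foldl_nil]
    rw [hstep, pv_filter_insertBy _ _ _ _ (PySem.List.sorted_pairwise names _), IH]
    unfold pvGroupOf
    rw [List.filter_append, List.filter_cons, List.filter_nil]

lemma pv_pairwise_lt_of_le_nodup {k : Type} [LinearOrder k] {l : List k}
    (hle : l.Pairwise (fun a b => a <= b)) (hnd : l.Nodup) :
    l.Pairwise (fun a b => a < b) :=
  (hle.and hnd).imp (fun h => lt_of_le_of_ne h.1 h.2)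

lemma pv_values_eq (names : List String) :
    (names.foldl (fun m n => m.modify (PySem.Str.lower n) [] (fun v => v ++ [n]))
        (PySem.Dict.empty : PySem.Dict String (List String))).values
      = (PySem.List.dedup (names.map PySem.Str.lower)).map (pvGroupOf names) := by
  have hkeys : (names.foldl (fun m n => m.modify (PySem.Str.lower n) [] (fun v => v ++ [n]))
      (PySem.Dict.empty : PySem.Dict String (List String))).keys
        = PySem.List.dedup (names.map PySem.Str.lower) := by
    rw [PySem.Dict.keys_foldl_modify_key names (fun n => PySem.Str.lower n) []
      (fun _ n => fun v => v ++ [n]) PySem.Dict.empty, PySem.Dict.keys_empty,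
      PySem.List.dedup_eq_ofList]
    rfl
  have hnd : (names.foldl (fun m n => m.modify (PySem.Str.lower n) [] (fun v => v ++ [n]))
      (PySem.Dict.empty : PySem.Dict String (List String))).keys.Nodup :=
    PySem.Dict.nodup_keys_foldl_modify_key names (fun n => PySem.Str.lower n) []
      (fun _ n => fun v => v ++ [n]) PySem.Dict.empty PySem.Dict.nodup_keys_empty
  rw [PySem.Dict.values_eq_map_keys _ hnd [], hkeys]
  refine List.map_congr_left (fun k _ => ?_)
  have hfold : names.foldl (fun m n => m.modify (PySem.Str.lower n) [] (fun v => v ++ [n]))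
      (PySem.Dict.empty : PySem.Dict String (List String))
        = (names.map (fun n => (PySem.Str.lower n, n))).foldl
            (fun d p => d.modify p.1 [] (fun v => v ++ [p.2])) PySem.Dict.empty := by
    rw [List.foldl_map]
  rw [hfold, PySem.Dict.getD_foldl_modify_append, PySem.Dict.getD_empty, List.nil_append,
    List.filter_map]
  unfold pvGroupOf
  rw [List.map_map]
  show List.map (fun n => n) _ = _
  rw [List.map_id']
  rfl

lemma pv_sorted_groups_eq (names : List String) :
    PySem.List.sorted ((PySem.List.dedup (names.map PySem.Str.lower)).map (pvGroupOf names))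
        (fun v => PySem.Str.lower ((PySem.List.sorted v (fun x => x)).headD ""))
      = (PySem.List.sorted (PySem.List.dedup (names.map PySem.Str.lower)) (fun x => x)).map
          (pvGroupOf names) := by
  have hkey : ∀ k ∈ names.map PySem.Str.lower,
      PySem.Str.lower ((PySem.List.sorted (pvGroupOf names k) (fun x => x)).headD "") = k := by
    intro k hk
    rcases List.mem_map.mp hk with ⟨n, hn, rfl⟩
    have hne : pvGroupOf names (PySem.Str.lower n) ≠ [] := by
      intro hnil
      have : n ∈ pvGroupOf names (PySem.Str.lower n) := by
        unfold pvGroupOf; rw [List.mem_filter]; exact ⟨hn, by simp⟩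
      rw [hnil] at this; exact absurd this (List.not_mem_nil)
    have hsne : PySem.List.sorted (pvGroupOf names (PySem.Str.lower n)) (fun x => x) ≠ [] := by
      rw [Ne, PySem.List.sorted_eq_nil_iff]; exact hne
    rcases List.exists_cons_of_ne_nil hsne with ⟨m, t, hmt⟩
    have hm : m ∈ pvGroupOf names (PySem.Str.lower n) := by
      rw [← PySem.List.mem_sorted _ (fun x => x) false, hmt]; exact List.mem_cons_self
    unfold pvGroupOf at hm
    rw [List.mem_filter] at hm
    rw [hmt]
    simpa using hm.2
  apply PySem.List.sorted_eq_of_perm_of_pairwise_lt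
  · exact (PySem.List.sorted_perm _ (fun x => x) false).map (pvGroupOf names)
  · rw [List.pairwise_map]
    have hnds : (PySem.List.sorted (PySem.List.dedup (names.map PySem.Str.lower))
        (fun x => x)).Nodup :=
      (PySem.List.sorted_perm _ (fun x => x) false).symm.nodup (PySem.List.nodup_dedup _)
    have hlt := pv_pairwise_lt_of_le_nodup
      (PySem.List.sorted_pairwise (PySem.List.dedup (names.map PySem.Str.lower)) (fun x => x))
      hnds
    refine hlt.imp_of_mem (fun {a b} ha hb hab => ?_)
    have ha' : a ∈ names.map PySem.Str.lower := by
      rw [← PySem.List.mem_dedup, ← PySem.List.mem_sorted _ (fun x => x) false]; exact ha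
    have hb' : b ∈ names.map PySem.Str.lower := by
      rw [← PySem.List.mem_dedup, ← PySem.List.mem_sorted _ (fun x => x) false]; exact hb
    rw [hkey a ha', hkey b hb']
    exact hab

-- the central fact: A's sorted dict values = B's groupby groups
lemma pv_groups_eq (names : List String) :
    PySem.List.sorted
        (names.foldl (fun m n => m.modify (PySem.Str.lower n) [] (fun v => v ++ [n]))
          (PySem.Dict.empty : PySem.Dict String (List String))).values
        (fun v => PySem.Str.lower ((PySem.List.sorted v (fun x => x)).headD ""))
      = pvGroupby (fun n => PySem.Str.lower n)
          (PySem.List.sorted names (fun n => PySem.Str.lower n)) := by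
  rw [pv_values_eq, pv_sorted_groups_eq,
    pv_groupby_eq _ _ (PySem.List.sorted_pairwise names (fun n => PySem.Str.lower n)),
    pv_dedup_sorted_eq]
  exact (List.map_congr_left (fun k _ => (pv_filter_sorted names k).symm))

-- ===== VERDICT (by name: the statement is the Claim_ definition above) =====
theorem check_case_siblings_py_spec : Claim_equal_check_case_siblings_py := by
  intro pc _
  unfold Spec_check_case_siblings_py check_case_siblings_py check_case_siblings_py_alt
  dsimp only
  congr 1
  funext results parent_path
  rw [pv_groups_eq]
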